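-- pv_equiv track=rewrite | github.com/rysweet/azure-tenant-grapher | src/iac/traverser.py | _detect_cycle_details
-- ===== SOURCE A (Python) =====
-- from typing import Any, Dict, List, LiteralString, Optional, Set, cast
--
-- def _detect_cycle_details(
--
--     cycle_resources: List[str],
--     adj_list: Dict[str, List[str]],
--     resource_map: Dict[str, Dict[str, Any]],
-- ) -> str:
--     """Detect and format cycle details for error messages.
--
--     Args:
--         cycle_resources: List of resource IDs involved in cycles
--         adj_list: Adjacency list (target -> [sources])
--         resource_map: Map of resource ID to resource dict
--
--     Returns:
--         Formatted string describing the cycles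
--     """
--     cycle_details = []
--     visited: Set[str] = set()
--
--     for start_id in cycle_resources[:5]:  # Limit to first 5 cycles
--         if start_id in visited:
--             continue
--
--         # Try to find a cycle starting from this resource
--         path = []
--         current = start_id
--         path_set: Set[str] = set()
--
--         while current not in visited:
--             if current in path_set:
--                 # Found a cycle
--                 cycle_start_idx = path.index(current)
--                 cycle_path = path[cycle_start_idx:]
--                 cycle_path.append(current)  # Close the cycle
--
--                 # Format cycle
--                 cycle_names = []
--                 for rid in cycle_path:
--                     resource = resource_map.get(rid, {})
--                     name = resource.get("name", rid)
--                     res_type = resource.get("type", "unknown")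
--                     cycle_names.append(f"{name} ({res_type})")
--
--                 cycle_details.append(" -> ".join(cycle_names))
--                 visited.update(path)
--                 break
--
--             visited.add(current)
--             path.append(current)
--             path_set.add(current)
--
--             # Move to next node in adjacency list
--             neighbors = adj_list.get(current, [])
--             if neighbors:
--                 current = neighbors[0]
--             else:
--                 break
--
--     if cycle_details:
--         return "\n".join(
--             f"  Cycle {i + 1}: {cycle}" for i, cycle in enumerate(cycle_details)
--         )
--     else:
--         return f"  {len(cycle_resources)} resources have unresolved dependencies"
-- ===== SOURCE B (Python) =====
-- from typing import Any, Dict, List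
--
-- def _detect_cycle_details(
--     cycle_resources: List[str],
--     adj_list: Dict[str, List[str]],
--     resource_map: Dict[str, Dict[str, Any]],
-- ) -> str:
--     # The cycle-detection branch in the original is unreachable: every node is
--     # added to `visited` in the same step it is added to `path_set`, and the
--     # `while current not in visited` guard then blocks any revisit, so no
--     # cycle is ever formatted.  The result is therefore always the fallback line.
--     return f"  {len(cycle_resources)} resources have unresolved dependencies"
-- ===== Notes on version B (the rewrite author's own statement) =====
-- stated objective: simpler
-- what changed: B drops A's entire graph walk: A's cycle-detection branch is unreachable (every node enters `visited` in the same step it enters `path_set`, and the `while current not in visited` guard blocks re-entry), so `cycle_details` is always empty and the function always returns the fallback line; B returns that f-string directly.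
import Mathlib
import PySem

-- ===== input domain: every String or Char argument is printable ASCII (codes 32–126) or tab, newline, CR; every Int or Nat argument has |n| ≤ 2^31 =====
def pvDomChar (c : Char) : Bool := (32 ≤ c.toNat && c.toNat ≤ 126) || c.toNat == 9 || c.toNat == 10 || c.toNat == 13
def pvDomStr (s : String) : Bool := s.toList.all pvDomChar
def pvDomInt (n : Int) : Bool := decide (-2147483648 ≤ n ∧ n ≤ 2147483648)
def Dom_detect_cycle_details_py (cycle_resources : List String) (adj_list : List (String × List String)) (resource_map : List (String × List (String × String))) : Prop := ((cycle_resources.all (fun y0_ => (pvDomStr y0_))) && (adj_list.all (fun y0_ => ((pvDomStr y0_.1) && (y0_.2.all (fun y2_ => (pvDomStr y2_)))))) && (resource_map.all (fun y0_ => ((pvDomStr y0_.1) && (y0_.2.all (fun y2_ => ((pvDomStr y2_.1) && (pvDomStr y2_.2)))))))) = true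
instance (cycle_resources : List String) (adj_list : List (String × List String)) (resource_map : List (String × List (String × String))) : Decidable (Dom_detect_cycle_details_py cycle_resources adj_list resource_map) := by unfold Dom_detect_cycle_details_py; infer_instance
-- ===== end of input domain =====

-- B replaces A's (dead) graph walk by the constant fallback line A always returns; objective: simpler.

-- ===== PORT A =====
-- inner `while current not in visited` loop of A; fuel only makes the recursion
-- total (each pass adds a fresh node to `visited`, so the generous fuel passed by
-- detect_cycle_details_py is never exhausted); state is (visited, cycle_details)
def pvInner (adj_list : List (String × List String)) (resource_map : List (String × List (String × String))) :
    Nat → String → PySem.Set String → List String → PySem.Set String → List String →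
    PySem.Set String × List String
  | 0, _, visited, _, _, cycle_details => (visited, cycle_details)
  | fuel + 1, current, visited, path, path_set, cycle_details =>
    if PySem.Set.contains visited current then (visited, cycle_details)   -- while-guard fails
    else if PySem.Set.contains path_set current then
      -- found a cycle (path.index(current): current ∈ path here, so getD 0 is not taken)
      let cycle_start_idx := (PySem.List.index? path current).getD 0
      let cycle_path := PySem.List.slice path (some (cycle_start_idx : Int)) none ++ [current]
      let cycle_names := cycle_path.map (fun rid =>
        let resource := PySem.Dict.getD (PySem.Dict.mk resource_map) rid []
        let name := PySem.Dict.getD (PySem.Dict.mk resource) "name" rid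
        let res_type := PySem.Dict.getD (PySem.Dict.mk resource) "type" "unknown"
        name ++ " (" ++ res_type ++ ")")
      (PySem.Set.update visited path, cycle_details ++ [PySem.Str.join " -> " cycle_names])
    else
      let visited' := PySem.Set.add visited current
      let path' := path ++ [current]
      let path_set' := PySem.Set.add path_set current
      match PySem.Dict.getD (PySem.Dict.mk adj_list) current [] with
      | [] => (visited', cycle_details)
      | n :: _ => pvInner adj_list resource_map fuel n visited' path' path_set' cycle_details

-- outer `for start_id in cycle_resources[:5]` loop of A, one constructor per
-- iteration; the first branch is Python's `if start_id in visited: continue`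
def pvOuter (adj_list : List (String × List String)) (resource_map : List (String × List (String × String)))
    (fuel : Nat) : List String → PySem.Set String × List String → PySem.Set String × List String
  | [], st => st
  | start_id :: rest, st =>
    if PySem.Set.contains st.1 start_id then
      pvOuter adj_list resource_map fuel rest st           -- continue
    else
      pvOuter adj_list resource_map fuel rest
        (pvInner adj_list resource_map fuel start_id st.1 [] PySem.Set.empty st.2)

def detect_cycle_details_py (cycle_resources : List String) (adj_list : List (String × List String)) (resource_map : List (String × List (String × String))) : String :=
  -- fuel exceeding the number of nodes the walk can ever add to `visited`
  let fuel := 1 + cycle_resources.length + adj_list.length + (adj_list.map (fun p => p.2.length)).sum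
  let st := pvOuter adj_list resource_map fuel
      (PySem.List.slice cycle_resources none (some (5 : Int))) (PySem.Set.empty, [])
  let cycle_details := st.2
  if cycle_details.isEmpty then
    "  " ++ PySem.Int.toStr (cycle_resources.length : Int) ++ " resources have unresolved dependencies"
  else
    PySem.Str.join "\n" ((PySem.List.enumerate cycle_details).map
      (fun ic => "  Cycle " ++ PySem.Int.toStr (ic.1 + 1) ++ ": " ++ ic.2))

-- ===== PORT B =====
def detect_cycle_details_py_alt (cycle_resources : List String) (adj_list : List (String × List String)) (resource_map : List (String × List (String × String))) : String :=
  "  " ++ PySem.Int.toStr (cycle_resources.length : Int) ++ " resources have unresolved dependencies"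

-- ===== PRECONDITION & SPEC =====
def Spec_detect_cycle_details_py (cycle_resources : List String) (adj_list : List (String × List String)) (resource_map : List (String × List (String × String))) (out : String) : Prop := out = detect_cycle_details_py_alt cycle_resources adj_list resource_map
instance (cycle_resources : List String) (adj_list : List (String × List String)) (resource_map : List (String × List (String × String))) (out : String) : Decidable (Spec_detect_cycle_details_py cycle_resources adj_list resource_map out) := by unfold Spec_detect_cycle_details_py; infer_instance

-- ===== CLAIM (what is proved, stated in full; the proofs are below) =====
def Claim_equal_detect_cycle_details_py : Prop := ∀ (cycle_resources : List String) (adj_list : List (String × List String)) (resource_map : List (String × List (String × String))), Dom_detect_cycle_details_py cycle_resources adj_list resource_map → Spec_detect_cycle_details_py cycle_resources adj_list resource_map (detect_cycle_details_py cycle_resources adj_list resource_map)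

-- ===== LEMMAS AND PROOFS =====

-- invariant: whenever path_set ⊆ visited, the inner loop never reaches the cycle
-- branch and leaves cycle_details untouched
theorem pvInner_snd (adj_list : List (String × List String)) (resource_map : List (String × List (String × String)))
    (fuel : Nat) (current : String) (visited : PySem.Set String) (path : List String)
    (path_set : PySem.Set String) (cycle_details : List String)
    (h : ∀ x, x ∈ path_set → x ∈ visited) :
    (pvInner adj_list resource_map fuel current visited path path_set cycle_details).2 = cycle_details := by
  induction fuel generalizing current visited path path_set with
  | zero => simp [pvInner]
  | succ fuel ih =>
    rw [pvInner]
    by_cases hv : current ∈ visited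
    · rw [if_pos (by simpa [PySem.Set.contains] using hv)]
    · have hp : current ∉ path_set := fun hm => hv (h _ hm)
      rw [if_neg (by simpa [PySem.Set.contains] using hv),
          if_neg (by simpa [PySem.Set.contains] using hp)]
      cases hn : PySem.Dict.getD (PySem.Dict.mk adj_list) current [] with
      | nil => rfl
      | cons n ns =>
        apply ih
        intro x hx
        rcases (PySem.Set.mem_add path_set current x).1 hx with h1 | h1
        · exact (PySem.Set.mem_add visited current x).2 (Or.inl (h x h1))
        · exact (PySem.Set.mem_add visited current x).2 (Or.inr h1)

-- the outer loop never changes the cycle_details component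
theorem pvOuter_snd (adj_list : List (String × List String)) (resource_map : List (String × List (String × String)))
    (fuel : Nat) (l : List String) (st : PySem.Set String × List String) :
    (pvOuter adj_list resource_map fuel l st).2 = st.2 := by
  induction l generalizing st with
  | nil => rfl
  | cons a l ih =>
    rw [pvOuter]
    by_cases hv : PySem.Set.contains st.1 a = true
    · rw [if_pos hv, ih]
    · rw [if_neg hv, ih]
      exact pvInner_snd adj_list resource_map fuel a st.1 [] PySem.Set.empty st.2
        (fun x hx => by simp [PySem.Set.empty] at hx)

-- ===== VERDICT (by name: the statement is the Claim_ definition above) =====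
theorem detect_cycle_details_py_spec : Claim_equal_detect_cycle_details_py := by
  intro cycle_resources adj_list resource_map _
  show detect_cycle_details_py cycle_resources adj_list resource_map
      = detect_cycle_details_py_alt cycle_resources adj_list resource_map
  simp only [detect_cycle_details_py, detect_cycle_details_py_alt, pvOuter_snd,
    List.isEmpty_nil, if_true]
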